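-- pv_equiv track=rewrite | github.com/OidaTiftla/docker-tag-enhancer | src/run.py | to_full_image_url
-- ===== SOURCE A (Python) =====
-- DOCKER_HOSTS = [
--     'index.docker.io',
--     'index.docker.com',
--     'registry.docker.io',
--     'registry.docker.com',
--     'registry-1.docker.io',
--     'registry-1.docker.com',
--     'docker.io',
--     'docker.com',
-- ]
--
-- def to_full_image_url(url):
--     if '.' not in url:
--         url = 'docker.io/' + url
--     if url.startswith('docker.io/'):
--         url = 'index.' + url
--     if not url.startswith('docker://'):
--         url = 'docker://' + url
--     for host in DOCKER_HOSTS: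
--         if url.startswith('docker://' + host + '/'):
--             url = url.replace('docker://' + host + '/', 'docker://index.docker.io/', 1)
--     return url
-- ===== SOURCE B (Python) =====
-- DOCKER_HOSTS_SET = {
--     'index.docker.io',
--     'index.docker.com',
--     'registry.docker.io',
--     'registry.docker.com',
--     'registry-1.docker.io',
--     'registry-1.docker.com',
--     'docker.io',
--     'docker.com',
-- }
--
-- def to_full_image_url(url):
--     if '.' not in url:
--         url = 'docker.io/' + url
--     if url.startswith('docker.io/'):
--         url = 'index.' + url
--     if not url.startswith('docker://'):
--         url = 'docker://' + url
--     rest = url[9:]  # after 'docker://'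
--     idx = rest.find('/')
--     if idx != -1 and rest[:idx] in DOCKER_HOSTS_SET:
--         url = 'docker://index.docker.io/' + rest[idx + 1:]
--     return url
-- ===== Notes on version B (the rewrite author's own statement) =====
-- stated objective: idiomatic
-- what changed: B replaces A's loop over all eight DOCKER_HOSTS prefixes (each doing a startswith plus a replace) by extracting the host part up to the first slash of the rest once and testing it against a set of known hosts.
import Mathlib
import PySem

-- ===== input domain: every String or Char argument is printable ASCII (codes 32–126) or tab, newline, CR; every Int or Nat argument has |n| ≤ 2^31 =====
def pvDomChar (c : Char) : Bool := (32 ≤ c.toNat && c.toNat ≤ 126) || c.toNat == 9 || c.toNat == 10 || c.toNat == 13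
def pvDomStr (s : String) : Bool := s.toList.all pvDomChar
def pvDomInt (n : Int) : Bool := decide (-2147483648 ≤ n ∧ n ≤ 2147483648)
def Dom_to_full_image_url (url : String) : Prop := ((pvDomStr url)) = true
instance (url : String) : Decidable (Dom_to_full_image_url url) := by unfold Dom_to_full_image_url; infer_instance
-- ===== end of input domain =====

-- B replaces A's scan over all DOCKER_HOSTS prefixes by extracting the host up to the
-- first slash once and looking it up in a set (idiomatic; same cost class on these tiny inputs).

-- ===== PORT A =====
def pvDockerHosts : List (List Char) :=
  ["index.docker.io".toList, "index.docker.com".toList, "registry.docker.io".toList,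
   "registry.docker.com".toList, "registry-1.docker.io".toList, "registry-1.docker.com".toList,
   "docker.io".toList, "docker.com".toList]

-- exact port of Python str.replace(old, new, 1): replace the FIRST occurrence only
def pvReplace1 (s old new : List Char) : List Char :=
  let i := PySem.Chars.find s old
  if i = -1 then s else s.take i.toNat ++ new ++ s.drop (i.toNat + old.length)

-- the body of A's for-loop
def pvStepA (u h : List Char) : List Char :=
  if PySem.Chars.startswith u ("docker://".toList ++ h ++ ['/'])
  then pvReplace1 u ("docker://".toList ++ h ++ ['/']) "docker://index.docker.io/".toList
  else u

-- the three guard statements shared verbatim by A and B ('.' check, 'index.' prefix, scheme)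
def pvGuards (u : List Char) : List Char :=
  let u1 := if PySem.Chars.isIn ['.'] u then u else "docker.io/".toList ++ u
  let u2 := if PySem.Chars.startswith u1 "docker.io/".toList then "index.".toList ++ u1 else u1
  if PySem.Chars.startswith u2 "docker://".toList then u2 else "docker://".toList ++ u2

def to_full_image_url (url : String) : String :=
  String.mk (pvDockerHosts.foldl pvStepA (pvGuards url.toList))

-- ===== PORT B =====
def pvDockerHostsSet : List (List Char) :=  -- B's DOCKER_HOSTS_SET (a Python set: distinct elements)
  ["index.docker.io".toList, "index.docker.com".toList, "registry.docker.io".toList,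
   "registry.docker.com".toList, "registry-1.docker.io".toList, "registry-1.docker.com".toList,
   "docker.io".toList, "docker.com".toList]

def to_full_image_url_alt (url : String) : String :=
  let u := pvGuards url.toList
  let rest := PySem.List.slice u (some 9) none            -- url[9:]
  let idx := PySem.Chars.find rest ['/']                   -- rest.find('/')
  if idx != -1 && pvDockerHostsSet.contains (PySem.List.slice rest none (some idx))
  then String.mk ("docker://index.docker.io/".toList ++ PySem.List.slice rest (some (idx + 1)) none)
  else String.mk u

-- ===== PRECONDITION & SPEC =====
def Spec_to_full_image_url (url : String) (out : String) : Prop := out = to_full_image_url_alt url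
instance (url : String) (out : String) : Decidable (Spec_to_full_image_url url out) := by unfold Spec_to_full_image_url; infer_instance

-- ===== CLAIM (what is proved, stated in full; the proofs are below) =====
def Claim_equal_to_full_image_url : Prop := ∀ (url : String), Dom_to_full_image_url url → Spec_to_full_image_url url (to_full_image_url url)

-- ===== LEMMAS AND PROOFS =====

lemma pvConsPrefix (a : Char) (l m : List Char) : a :: l <+: m ↔ ∃ t, m = a :: t ∧ l <+: t := by
  constructor
  · rintro ⟨u, rfl⟩; exact ⟨l ++ u, rfl, ⟨u, rfl⟩⟩
  · rintro ⟨t, rfl, ⟨u, rfl⟩⟩; exact ⟨u, rfl⟩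

lemma pvSlashfreePrefixIff (h h0 t : List Char) (hh : '/' ∉ h) (hh0 : '/' ∉ h0) :
    (h ++ ['/']) <+: (h0 ++ '/' :: t) ↔ h = h0 := by
  induction h generalizing h0 with
  | nil =>
    cases h0 with
    | nil => simp
    | cons c h0' =>
      constructor
      · intro hp
        simp only [List.nil_append, List.cons_append] at hp
        rcases (pvConsPrefix '/' [] _).1 hp with ⟨t', ht', -⟩
        have hc : c = '/' := (List.cons.inj ht').1
        subst hc
        simp at hh0
      · intro h; simp at h
  | cons a h' ih =>
    cases h0 with
    | nil =>
      constructor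
      · intro hp
        simp only [List.cons_append, List.nil_append] at hp
        rcases (pvConsPrefix a _ _).1 hp with ⟨t', ht', -⟩
        have ha : a = '/' := ((List.cons.inj ht').1).symm
        subst ha
        simp at hh
      · intro h; simp at h
    | cons c h0' =>
      have hh' : '/' ∉ h' := fun m => hh (List.mem_cons_of_mem _ m)
      have hh0' : '/' ∉ h0' := fun m => hh0 (List.mem_cons_of_mem _ m)
      constructor
      · intro hp
        rw [List.cons_append] at hp
        rcases (pvConsPrefix a _ _).1 hp with ⟨t', ht', hpre⟩
        obtain ⟨hc, hrest⟩ := List.cons.inj ht'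
        subst hc
        rw [← hrest] at hpre
        rw [(ih h0' hh' hh0').1 hpre]
      · intro h
        obtain ⟨hc, hr2⟩ := List.cons.inj h
        subst hc; subst hr2
        rw [List.cons_append]
        exact (pvConsPrefix _ _ _).2 ⟨_, rfl, (ih _ hh' hh0').2 rfl⟩

lemma pvFindPrefixZero (s sub : List Char) (h : sub <+: s) : PySem.Chars.find s sub = 0 := by
  have h0 : 0 ≤ PySem.Chars.find s sub := (PySem.Chars.find_nonneg_iff s sub).2 h.isInfix
  obtain ⟨-, hmin⟩ := PySem.Chars.find_spec h0
  by_contra hne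
  have hpos : 0 < (PySem.Chars.find s sub).toNat := by omega
  exact hmin 0 hpos (by simpa using h)

lemma pvReplace1Prefix (pat t new : List Char) : pvReplace1 (pat ++ t) pat new = new ++ t := by
  have h := pvFindPrefixZero (pat ++ t) pat ⟨t, rfl⟩
  simp [pvReplace1, h]

lemma pvP2Split (t : List Char) :
    "docker://index.docker.io/".toList ++ t =
      "docker://".toList ++ ("index.docker.io".toList ++ '/' :: t) := by
  have h1 : "docker://index.docker.io/".toList =
      "docker://".toList ++ "index.docker.io".toList ++ ['/'] := by decide
  rw [h1]; simp

lemma pvStepAShape (x h t : List Char) (hx : '/' ∉ x) (hh : '/' ∉ h) :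
    pvStepA ("docker://".toList ++ (x ++ '/' :: t)) h =
      if h = x then "docker://index.docker.io/".toList ++ t
      else "docker://".toList ++ (x ++ '/' :: t) := by
  have hguard : PySem.Chars.startswith ("docker://".toList ++ (x ++ '/' :: t))
      ("docker://".toList ++ h ++ ['/']) = true ↔ h = x := by
    rw [PySem.Chars.startswith_iff, List.append_assoc, List.prefix_append_right_inj]
    exact pvSlashfreePrefixIff h x t hh hx
  by_cases hhx : h = x
  · subst hhx
    have hst : "docker://".toList ++ (h ++ '/' :: t) =
        ("docker://".toList ++ h ++ ['/']) ++ t := by simp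
    rw [pvStepA, if_pos (hguard.2 rfl), hst, pvReplace1Prefix]
    simp
  · rw [pvStepA, if_neg (fun hc => hhx (hguard.1 hc)), if_neg hhx]

lemma pvLoopAfter (hs : List (List Char)) (hall : ∀ h ∈ hs, '/' ∉ h) (t : List Char) :
    List.foldl pvStepA ("docker://index.docker.io/".toList ++ t) hs =
      "docker://index.docker.io/".toList ++ t := by
  induction hs with
  | nil => rfl
  | cons h hs' ih =>
    rw [List.foldl_cons, pvP2Split t,
      pvStepAShape "index.docker.io".toList h t (by decide) (hall h (.head _))]
    split
    · exact ih (fun g hg => hall g (.tail _ hg))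
    · rw [← pvP2Split t]; exact ih (fun g hg => hall g (.tail _ hg))

lemma pvLoopMain (hs : List (List Char)) (hall : ∀ h ∈ hs, '/' ∉ h) (x t : List Char)
    (hx : '/' ∉ x) :
    List.foldl pvStepA ("docker://".toList ++ (x ++ '/' :: t)) hs =
      if x ∈ hs then "docker://index.docker.io/".toList ++ t
      else "docker://".toList ++ (x ++ '/' :: t) := by
  induction hs with
  | nil => simp
  | cons h hs' ih =>
    rw [List.foldl_cons, pvStepAShape x h t hx (hall h (.head _))]
    by_cases hhx : h = x
    · subst hhx
      rw [if_pos rfl, pvLoopAfter hs' (fun g hg => hall g (.tail _ hg)) t,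
        if_pos (List.mem_cons_self)]
    · rw [if_neg hhx, ih (fun g hg => hall g (.tail _ hg))]
      by_cases hx' : x ∈ hs'
      · rw [if_pos hx', if_pos (List.mem_cons_of_mem _ hx')]
      · rw [if_neg hx',
          if_neg (fun hm => (List.mem_cons.1 hm).elim (fun e => hhx e.symm) hx')]

lemma pvLoopNoSlash (hs : List (List Char)) (r : List Char) (hns : ¬ ['/'] <:+: r) :
    List.foldl pvStepA ("docker://".toList ++ r) hs = "docker://".toList ++ r := by
  induction hs with
  | nil => rfl
  | cons h hs' ih =>
    have hguard : PySem.Chars.startswith ("docker://".toList ++ r)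
        ("docker://".toList ++ h ++ ['/']) = false := by
      rw [← Bool.not_eq_true, PySem.Chars.startswith_iff, List.append_assoc,
        List.prefix_append_right_inj]
      intro hpre
      exact hns (((List.suffix_append h ['/']).isInfix).trans hpre.isInfix)
    rw [List.foldl_cons, pvStepA, hguard]
    simpa using ih

lemma pvGuardsShape (s : List Char) : ∃ r, pvGuards s = "docker://".toList ++ r := by
  have key : ∀ u2 : List Char,
      ∃ r, (if PySem.Chars.startswith u2 "docker://".toList then u2
            else "docker://".toList ++ u2) = "docker://".toList ++ r := by
    intro u2
    split
    · next hst =>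
      obtain ⟨r, hr⟩ := (PySem.Chars.startswith_iff _ _).1 hst
      exact ⟨r, hr.symm⟩
    · exact ⟨_, rfl⟩
  unfold pvGuards
  exact key _

lemma pvFindDecomp (r : List Char) (h : PySem.Chars.find r ['/'] ≠ -1) :
    '/' ∉ r.take (PySem.Chars.find r ['/']).toNat ∧
      r = r.take (PySem.Chars.find r ['/']).toNat ++
          '/' :: r.drop ((PySem.Chars.find r ['/']).toNat + 1) := by
  have h0 : 0 ≤ PySem.Chars.find r ['/'] := by
    have := PySem.Chars.neg_one_le_find r ['/']; omega
  obtain ⟨hpre, hmin⟩ := PySem.Chars.find_spec h0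
  set k := (PySem.Chars.find r ['/']).toNat with hk
  obtain ⟨t, ht, -⟩ := (pvConsPrefix '/' [] (r.drop k)).1 hpre
  have hklt : k < r.length := by
    by_contra hge
    rw [List.drop_eq_nil_of_le (by omega)] at ht
    simp at ht
  constructor
  · intro hmem
    obtain ⟨i, hi, hgi⟩ := List.getElem_of_mem hmem
    have hi' := hi
    simp [List.length_take] at hi'
    have hik : i < k := hi'.1
    have hri : r[i]'(by omega) = '/' := by
      rw [← hgi]; exact (List.getElem_take).symm
    refine hmin i hik ⟨r.drop (i + 1), ?_⟩
    rw [List.singleton_append, ← hri, ← List.drop_eq_getElem_cons]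
  · have hdt : r.drop (k + 1) = t := by
      have : r.drop (k + 1) = (r.drop k).drop 1 := by rw [List.drop_drop, Nat.add_comm]
      rw [this, ht, List.drop_one, List.tail_cons]
    calc r = r.take k ++ r.drop k := (List.take_append_drop k r).symm
    _ = r.take k ++ '/' :: r.drop (k + 1) := by rw [ht, hdt]

lemma pvDropNine (r : List Char) : ("docker://".toList ++ r).drop 9 = r := by
  have h9 : ("docker://".toList).length = 9 := by decide
  rw [← h9, List.drop_left]

lemma pvHostsSlashfree : ∀ h ∈ pvDockerHosts, '/' ∉ h := by decide

-- ===== VERDICT (by name: the statement is the Claim_ definition above) =====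
theorem to_full_image_url_spec : Claim_equal_to_full_image_url := by
  intro url _
  unfold Spec_to_full_image_url to_full_image_url to_full_image_url_alt
  obtain ⟨r, hr⟩ := pvGuardsShape url.toList
  rw [hr]
  dsimp only
  have hrest : PySem.List.slice ("docker://".toList ++ r) (some 9) none = r := by
    rw [PySem.List.slice_from _ (by norm_num)]
    have h9 : ((9:Int)).toNat = 9 := rfl
    rw [h9]; exact pvDropNine r
  rw [hrest]
  by_cases hf : PySem.Chars.find r ['/'] = -1
  · have hns : ¬ ['/'] <:+: r := (PySem.Chars.find_eq_neg_one_iff r ['/']).1 hf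
    rw [pvLoopNoSlash pvDockerHosts r hns]
    simp [hf]
  · have h0 : 0 ≤ PySem.Chars.find r ['/'] := by
      have := PySem.Chars.neg_one_le_find r ['/']; omega
    obtain ⟨hnm, hdec⟩ := pvFindDecomp r hf
    set k := (PySem.Chars.find r ['/']).toNat with hk
    have hbne : (PySem.Chars.find r ['/'] != -1) = true := by simp [hf]
    have hto : PySem.List.slice r none (some (PySem.Chars.find r ['/'])) = r.take k := by
      rw [PySem.List.slice_to _ h0]
    have hfrom : PySem.List.slice r (some (PySem.Chars.find r ['/'] + 1)) none
        = r.drop (k + 1) := by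
      rw [PySem.List.slice_from _ (by omega)]
      congr 1; omega
    rw [hbne, hto, hfrom]
    conv_lhs => rw [hdec]
    rw [pvLoopMain pvDockerHosts pvHostsSlashfree (r.take k) (r.drop (k + 1)) hnm]
    have hsets : pvDockerHostsSet = pvDockerHosts := rfl
    by_cases hm : r.take k ∈ pvDockerHosts
    · rw [if_pos hm]
      have hct : pvDockerHostsSet.contains (r.take k) = true := by
        rw [hsets, List.contains_iff_mem]; exact hm
      rw [if_pos (show (true && pvDockerHostsSet.contains (r.take k)) = true
        by rw [hct]; rfl)]
    · rw [if_neg hm]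
      have hct : pvDockerHostsSet.contains (r.take k) = false := by
        rw [hsets]
        rw [← Bool.not_eq_true, List.contains_iff_mem]; exact hm
      rw [if_neg (show ¬ (true && pvDockerHostsSet.contains (r.take k)) = true
        by rw [hct]; decide)]
      rw [← hdec]
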